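-- pv_equiv track=rewrite | github.com/Nonac/CS_2019_UoB | function.py | countEdgesInLocal
-- ===== SOURCE A (Python) =====
-- def countEdgesInLocal(edges, withFather=True):
--     local = []
--     for i in range(len(edges) + 1):
--         cnt = 0
--         if i > 0:
--             for each in edges[i - 1]:
--                 if each == 1:
--                     cnt += 1
--         if i < (len(edges) + 1):
--             for group in edges:
--                 if len(group) > i:
--                     if group[i] == 1:
--                         cnt += 1
--         # father to child edge
--         if withFather:
--             cnt += 1
--         local.append(cnt)
--     return local
-- ===== SOURCE B (Python) =====
-- def countEdgesInLocal(edges, withFather=True):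
--     f = 1 if withFather else 0
--     col = {}
--     rows = [0]
--     for g in edges:
--         r = 0
--         for j, v in enumerate(g):
--             if v == 1:
--                 r += 1
--                 col[j] = col.get(j, 0) + 1
--         rows.append(r)
--     return [rows[i] + col.get(i, 0) + f for i in range(len(edges) + 1)]
-- ===== Notes on version B (the rewrite author's own statement) =====
-- stated objective: faster
-- what changed: B makes one pass over the matrix entries, accumulating a dict of column sums and a list of row sums, then reads each node's degree off by index, instead of A's per-node rescan of its row and of every row's i-th entry.
import Mathlib
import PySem

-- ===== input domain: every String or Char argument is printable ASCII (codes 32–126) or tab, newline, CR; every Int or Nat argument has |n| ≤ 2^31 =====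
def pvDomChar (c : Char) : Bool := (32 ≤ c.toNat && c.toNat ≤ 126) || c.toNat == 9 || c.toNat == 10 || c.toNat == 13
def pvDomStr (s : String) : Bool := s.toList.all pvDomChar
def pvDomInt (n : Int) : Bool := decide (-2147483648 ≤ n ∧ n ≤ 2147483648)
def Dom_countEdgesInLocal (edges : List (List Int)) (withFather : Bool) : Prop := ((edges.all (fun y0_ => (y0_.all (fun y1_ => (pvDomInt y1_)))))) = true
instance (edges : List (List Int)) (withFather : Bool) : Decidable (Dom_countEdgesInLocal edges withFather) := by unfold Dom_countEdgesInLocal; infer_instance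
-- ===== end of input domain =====

-- B replaces A's per-node rescans of the whole matrix by one pass that builds a
-- hash map of column sums and a list of row sums (faster: O(entries + n) vs A's O(n^2 + entries)).

-- ===== PORT A =====
-- literal transliteration of A: for each i in range(len(edges)+1) it rescans
-- row i-1 and scans every row's i-th entry; list indices are in range at every
-- access, so getD is exact there.
def countEdgesInLocal (edges : List (List Int)) (withFather : Bool) : List Int :=
  (List.range (edges.length + 1)).foldl (fun local_ i =>
    let cnt : Int := 0
    let cnt := if 0 < i then
        (edges.getD (i - 1) []).foldl (fun c e => if e = 1 then c + 1 else c) cnt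
      else cnt
    let cnt := if i < edges.length + 1 then
        edges.foldl (fun c g => if i < g.length then (if g.getD i 0 = 1 then c + 1 else c) else c) cnt
      else cnt
    let cnt := if withFather then cnt + 1 else cnt
    local_ ++ [cnt]) []

-- ===== PORT B =====
-- literal transliteration of Source B: one pass over the entries builds the dict of
-- column sums and the row-sum list; the final comprehension indexes them
-- (rows[i] is always a valid index, so getD is exact there).
def countEdgesInLocal_alt (edges : List (List Int)) (withFather : Bool) : List Int :=
  let f : Int := if withFather then 1 else 0
  let st := edges.foldl (fun (st : PySem.Dict Int Int × List Int) g =>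
      let p := (PySem.List.enumerate g 0).foldl
          (fun (p : PySem.Dict Int Int × Int) jv =>
            if jv.2 = 1 then (p.1.modify jv.1 0 (· + 1), p.2 + 1) else p)
          (st.1, 0)
      (p.1, st.2 ++ [p.2]))
    (PySem.Dict.empty, [(0 : Int)])
  (List.range (edges.length + 1)).map (fun i => st.2.getD i 0 + st.1.getD (i : Int) 0 + f)

-- ===== PRECONDITION & SPEC =====
def Spec_countEdgesInLocal (edges : List (List Int)) (withFather : Bool) (out : List Int) : Prop := out = countEdgesInLocal_alt edges withFather
instance (edges : List (List Int)) (withFather : Bool) (out : List Int) : Decidable (Spec_countEdgesInLocal edges withFather out) := by unfold Spec_countEdgesInLocal; infer_instance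

-- ===== CLAIM (what is proved, stated in full; the proofs are below) =====
def Claim_equal_countEdgesInLocal : Prop := ∀ (edges : List (List Int)) (withFather : Bool), Dom_countEdgesInLocal edges withFather → Spec_countEdgesInLocal edges withFather (countEdgesInLocal edges withFather)

-- ===== LEMMAS AND PROOFS =====

/-- number of 1-entries of a row (A's first inner loop from 0). -/
def pvOnes (g : List Int) : Int := g.foldl (fun c e => if e = 1 then c + 1 else c) 0

/-- number of 1s of `g` sitting at (enumerate-)index `q`, indices starting at `s`. -/
def pvCountAt : List Int → Int → Int → Int
  | [], _, _ => 0
  | e :: es, s, q => (if s = q ∧ e = 1 then 1 else 0) + pvCountAt es (s + 1) q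

/-- column sum of column `q` over the rows `es` (indices from 0). -/
def pvColSum : List (List Int) → Int → Int
  | [], _ => 0
  | g :: es, q => pvCountAt g 0 q + pvColSum es q

lemma pvOnes_shift (g : List Int) : ∀ c : Int,
    g.foldl (fun c e => if e = 1 then c + 1 else c) c = c + pvOnes g := by
  induction g with
  | nil => intro c; simp [pvOnes]
  | cons e es ih =>
      intro c
      simp only [pvOnes, List.foldl_cons] at *
      rw [ih, ih (if e = 1 then 0 + 1 else 0)]
      split_ifs <;> ring

lemma pvCountAt_cons (e : Int) (es : List Int) (s q : Int) :
    pvCountAt (e :: es) s q = (if s = q ∧ e = 1 then 1 else 0) + pvCountAt es (s + 1) q := rfl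

lemma pvOnes_cons (e : Int) (es : List Int) :
    pvOnes (e :: es) = (if e = 1 then 1 else 0) + pvOnes es := by
  simp only [pvOnes, List.foldl_cons]
  rw [pvOnes_shift]
  split_ifs <;> simp [pvOnes]

lemma pvInner (g : List Int) : ∀ (s : Int) (d : PySem.Dict Int Int) (c : Int),
    ((PySem.List.enumerate g s).foldl
        (fun (p : PySem.Dict Int Int × Int) jv =>
          if jv.2 = 1 then (p.1.modify jv.1 0 (· + 1), p.2 + 1) else p) (d, c)).2
      = c + pvOnes g
    ∧ ∀ q : Int,
      ((PySem.List.enumerate g s).foldl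
        (fun (p : PySem.Dict Int Int × Int) jv =>
          if jv.2 = 1 then (p.1.modify jv.1 0 (· + 1), p.2 + 1) else p) (d, c)).1.getD q 0
      = d.getD q 0 + pvCountAt g s q := by
  induction g with
  | nil => intro s d c; simp [PySem.List.enumerate_nil, pvOnes, pvCountAt]
  | cons e es ih =>
      intro s d c
      rw [PySem.List.enumerate_cons]
      simp only [List.foldl_cons]
      by_cases he : e = 1
      · simp only [he, reduceIte]
        refine ⟨?_, ?_⟩
        · rw [(ih (s + 1) (d.modify s 0 (· + 1)) (c + 1)).1, pvOnes_cons]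
          norm_num
          ring
        · intro q
          rw [(ih (s + 1) (d.modify s 0 (· + 1)) (c + 1)).2 q]
          rw [PySem.Dict.getD_modify, pvCountAt_cons]
          simp only [and_true]
          by_cases hq : q = s
          · subst hq
            simp only [if_true, if_pos rfl]
            ring
          · rw [if_neg hq, if_neg (fun h : s = q => hq h.symm)]
            ring
      · simp only [if_neg he]
        refine ⟨?_, ?_⟩
        · rw [(ih (s + 1) d c).1, pvOnes_cons, if_neg he]
          ring
        · intro q
          rw [(ih (s + 1) d c).2 q, pvCountAt_cons,
            if_neg (fun h : _ ∧ e = 1 => he h.2)]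
          ring

lemma pvOuter (es : List (List Int)) : ∀ (d : PySem.Dict Int Int) (acc : List Int),
    (es.foldl (fun (st : PySem.Dict Int Int × List Int) g =>
        let p := (PySem.List.enumerate g 0).foldl
            (fun (p : PySem.Dict Int Int × Int) jv =>
              if jv.2 = 1 then (p.1.modify jv.1 0 (· + 1), p.2 + 1) else p)
            (st.1, 0)
        (p.1, st.2 ++ [p.2])) (d, acc)).2
      = acc ++ es.map pvOnes
    ∧ ∀ q : Int,
      (es.foldl (fun (st : PySem.Dict Int Int × List Int) g =>
        let p := (PySem.List.enumerate g 0).foldl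
            (fun (p : PySem.Dict Int Int × Int) jv =>
              if jv.2 = 1 then (p.1.modify jv.1 0 (· + 1), p.2 + 1) else p)
            (st.1, 0)
        (p.1, st.2 ++ [p.2])) (d, acc)).1.getD q 0
      = d.getD q 0 + pvColSum es q := by
  induction es with
  | nil => intro d acc; simp [pvColSum]
  | cons g es ih =>
      intro d acc
      simp only [List.foldl_cons, List.map_cons]
      have hin := pvInner g 0 d 0
      refine ⟨?_, ?_⟩
      · rw [(ih _ _).1, hin.1]
        simp
      · intro q
        rw [(ih _ _).2 q, hin.2 q]
        simp only [pvColSum, zero_add]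
        ring

lemma pvCountAt_lt (g : List Int) : ∀ (s q : Int), q < s → pvCountAt g s q = 0 := by
  induction g with
  | nil => intro s q _; rfl
  | cons e es ih =>
      intro s q hq
      simp only [pvCountAt]
      have h1 : ¬ (s = q ∧ e = 1) := fun h => by omega
      rw [if_neg h1, ih (s + 1) q (by omega)]
      simp

lemma pvCountAt_eq (g : List Int) : ∀ (s : Int) (i : Nat),
    pvCountAt g (s) (s + i) = if i < g.length ∧ g.getD i 0 = 1 then 1 else 0 := by
  induction g with
  | nil => intro s i; simp [pvCountAt]
  | cons e es ih =>
      intro s i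
      simp only [pvCountAt]
      cases i with
      | zero =>
          simp only [Nat.cast_zero, add_zero]
          rw [pvCountAt_lt es (s + 1) s (by omega)]
          simp [List.getD]
      | succ k =>
          have h1 : ¬ (s = s + (((k + 1 : Nat) : Int)) ∧ e = 1) := fun h => by
            have := h.1; push_cast at this; omega
          rw [if_neg h1]
          have hc : (s : Int) + ((k + 1 : Nat) : Int) = (s + 1) + (k : Nat) := by push_cast; ring
          rw [hc, ih (s + 1) k]
          simp [List.getD, Nat.succ_lt_succ_iff]

/-- A's natural-indexed column sum. -/
def pvColSumN : List (List Int) → Nat → Int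
  | [], _ => 0
  | g :: es, i => (if i < g.length ∧ g.getD i 0 = 1 then 1 else 0) + pvColSumN es i

lemma pvColSum_eq (es : List (List Int)) (i : Nat) : pvColSum es (i : Int) = pvColSumN es i := by
  induction es with
  | nil => rfl
  | cons g es ih =>
      simp only [pvColSum, pvColSumN, ih]
      have := pvCountAt_eq g 0 i
      simp only [zero_add] at this
      rw [this]

lemma pvAFold2 (es : List (List Int)) (i : Nat) : ∀ c : Int,
    es.foldl (fun c g => if i < g.length then (if g.getD i 0 = 1 then c + 1 else c) else c) c
      = c + pvColSumN es i := by
  induction es with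
  | nil => intro c; simp [pvColSumN]
  | cons g es ih =>
      intro c
      simp only [List.foldl_cons, pvColSumN]
      rw [ih]
      by_cases h1 : i < g.length
      · by_cases h2 : g.getD i 0 = 1
        · rw [if_pos h1, if_pos h2, if_pos (And.intro h1 h2)]; ring
        · rw [if_pos h1, if_neg h2, if_neg (fun h : _ ∧ _ => h2 h.2)]; ring
      · rw [if_neg h1, if_neg (fun h : _ ∧ _ => h1 h.1)]; ring

lemma pvAppendFold {α β : Type} (f : α → β) (l : List α) : ∀ acc : List β,
    l.foldl (fun L i => L ++ [f i]) acc = acc ++ l.map f := by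
  induction l with
  | nil => intro acc; simp
  | cons x xs ih => intro acc; simp [ih]

lemma pvMapGetD (es : List (List Int)) : ∀ (k : Nat), k < es.length →
    (es.map pvOnes).getD k 0 = pvOnes (es.getD k []) := by
  induction es with
  | nil => intro k hk; simp at hk
  | cons g es ih =>
      intro k hk
      cases k with
      | zero => simp [List.getD]
      | succ m =>
          simp only [List.map_cons, List.getD_cons_succ]
          exact ih m (by simpa using hk)

-- ===== VERDICT (by name: the statement is the Claim_ definition above) =====
theorem countEdgesInLocal_spec : Claim_equal_countEdgesInLocal := by
  intro edges withFather _
  unfold Spec_countEdgesInLocal countEdgesInLocal countEdgesInLocal_alt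
  have hout := pvOuter edges PySem.Dict.empty [(0 : Int)]
  rw [pvAppendFold]
  apply List.ext_getElem
  · simp
  · intro k hk1 hk2
    simp only [List.nil_append, List.getElem_map, List.getElem_range]
    have hkn : k < edges.length + 1 := by simpa using hk1
    -- B side values
    rw [hout.1]
    have hcol := hout.2 (k : Int)
    rw [hcol, PySem.Dict.getD_empty, pvColSum_eq]
    -- A side
    rw [if_pos hkn, pvAFold2]
    have hrows : (([(0 : Int)] ++ edges.map pvOnes).getD k 0)
        = if 0 < k then pvOnes (edges.getD (k - 1) []) else 0 := by
      cases k with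
      | zero => simp [List.getD]
      | succ m =>
          simp only [List.singleton_append, List.getD_cons_succ]
          rw [pvMapGetD edges m (by omega)]
          simp
    rw [hrows]
    by_cases h0 : 0 < k
    · rw [if_pos h0, pvOnes_shift]
      cases withFather <;> simp only [Bool.false_eq_true, eq_self_iff_true, if_true, if_false] <;>
        rw [if_pos h0] <;> ring
    · rw [if_neg h0]
      cases withFather <;> simp only [Bool.false_eq_true, eq_self_iff_true, if_true, if_false] <;>
        rw [if_neg h0] <;> ring
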